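-- pv_equiv track=rewrite | github.com/COVIDAnalytics/website | index.py | switch_oxygen
-- ===== SOURCE A (Python) =====
-- def switch_oxygen(vec,ind):
--     #assume there is only 1 categorical variable
--     ind = ind + 1
--     vec = list(vec)
--     vals = vec[0]
--     if len(vals) > 0:
--         oxygen = vals[-1]
--         n = len(vals)-1
--         for i in range(n,ind,-1):
--             vals[i] = vals[i-1]
--         vals[ind] = oxygen
--         vec[0] = vals
--         return tuple(vec)
--     vec[0] = vals
--     return tuple(vec)
-- ===== SOURCE B (Python) =====
-- def switch_oxygen(vec, ind):
--     # B: rebuilds the first row functionally from slices, rotating vals[ind+1:]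
--     # right by one with the reversal trick (reverse, split off head, reverse the
--     # tail back) instead of A's in-place backward shifting loop; return value
--     # only -- B does not mutate the caller's inner list as A does.
--     vec = list(vec)
--     vals = vec[0]
--     if len(vals) > 0:
--         k = ind + 1
--         r = vals[k:][::-1]
--         vec[0] = vals[:k] + r[:1] + r[1:][::-1]
--     return tuple(vec)
-- ===== Notes on version B (the rewrite author's own statement) =====
-- stated objective: alternative
-- what changed: replaces A's in-place backward element-shifting loop with a purely functional rebuild of the row from slices, rotating the suffix vals[ind+1:] right by one via the reversal trick (reverse, split off the head, reverse the tail back)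
-- outside the precondition, e.g. on switch_oxygen([[1, 2, 3]], -3): A returns ([2, 3, 1],), B returns ([1, 3, 2],)
import Mathlib
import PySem

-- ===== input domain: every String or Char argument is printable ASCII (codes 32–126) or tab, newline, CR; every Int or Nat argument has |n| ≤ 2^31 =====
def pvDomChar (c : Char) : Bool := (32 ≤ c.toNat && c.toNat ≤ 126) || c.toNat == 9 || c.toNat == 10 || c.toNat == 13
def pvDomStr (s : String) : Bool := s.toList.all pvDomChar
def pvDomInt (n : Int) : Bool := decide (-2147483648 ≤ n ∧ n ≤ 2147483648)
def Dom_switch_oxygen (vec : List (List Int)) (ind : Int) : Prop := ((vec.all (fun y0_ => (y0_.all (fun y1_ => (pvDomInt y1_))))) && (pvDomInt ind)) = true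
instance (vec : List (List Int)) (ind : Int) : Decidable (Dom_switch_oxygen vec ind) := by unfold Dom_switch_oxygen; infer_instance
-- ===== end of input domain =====

-- B rebuilds the first row functionally from slices, rotating the suffix vals[ind+1:]
-- right by one via the reversal trick, instead of A's in-place backward shifting loop;
-- the equivalence is about the RETURN value (B does not mutate the caller's inner list).

-- ===== PORT A =====
def switch_oxygen (vec : List (List Int)) (ind : Int) : List (List Int) :=
  let ind := ind + 1
  match PySem.List.pyGet? vec 0 with
  | none => []      -- vec[0] on empty vec: IndexError (excluded by Pre_)
  | some vals =>
    if (vals.length : Int) > 0 then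
      let oxygen := PySem.List.pyGetD vals (-1) 0
      let n : Int := (vals.length : Int) - 1
      let vals := (PySem.List.pyRange n ind (-1)).foldl
        (fun vs i => PySem.List.pySetD vs i (PySem.List.pyGetD vs (i - 1) 0)) vals
      let vals := PySem.List.pySetD vals ind oxygen
      PySem.List.pySetD vec 0 vals
    else
      PySem.List.pySetD vec 0 vals

-- ===== PORT B =====
def switch_oxygen_alt (vec : List (List Int)) (ind : Int) : List (List Int) :=
  match vec with
  | [] => []        -- vec[0] on empty vec: IndexError (excluded by Pre_)
  | vals :: rest =>
    if (vals.length : Int) > 0 then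
      let k := ind + 1
      -- vals[k:][::-1]  (s[::-1] is reverse: PySem slice?_none_none_neg_one)
      let r := (PySem.List.slice vals (some k) none).reverse
      -- vals[:k] + r[:1] + r[1:][::-1]
      (PySem.List.slice vals none (some k) ++ PySem.List.slice r none (some 1)
        ++ (PySem.List.slice r (some 1) none).reverse) :: rest
    else vals :: rest

-- ===== PRECONDITION & SPEC =====
-- Pre_ excludes: empty vec and nonempty first row with ind+1 ≥ its length (A raises
-- IndexError there), and ind ≤ -2 with a nonempty first row, where A's value is an
-- artefact of Python negative-index wraparound (the shift loop rereads cells it has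
-- already overwritten) outside the natural domain of a position index.
def Pre_switch_oxygen (vec : List (List Int)) (ind : Int) : Prop :=
  vec ≠ [] ∧ (vec.headD [] = [] ∨ (-1 ≤ ind ∧ ind + 1 < ((vec.headD []).length : Int)))
instance (vec : List (List Int)) (ind : Int) : Decidable (Pre_switch_oxygen vec ind) := by
  unfold Pre_switch_oxygen; infer_instance

def pvWitness_switch_oxygen : List (List Int) × Int := ([[1, 2, 3]], 0)

def Spec_switch_oxygen (vec : List (List Int)) (ind : Int) (out : List (List Int)) : Prop := out = switch_oxygen_alt vec ind
instance (vec : List (List Int)) (ind : Int) (out : List (List Int)) : Decidable (Spec_switch_oxygen vec ind out) := by unfold Spec_switch_oxygen; infer_instance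

-- ===== CLAIM (what is proved, stated in full; the proofs are below) =====
def Claim_equal_switch_oxygen : Prop := ∀ (vec : List (List Int)) (ind : Int), Dom_switch_oxygen vec ind → Pre_switch_oxygen vec ind → Spec_switch_oxygen vec ind (switch_oxygen vec ind)

-- ===== LEMMAS AND PROOFS =====

-- A's shifting loop `for i in range(j+d, j, -1): vs[i] = vs[i-1]`, characterised
-- elementwise: length unchanged; position i holds vs[i-1] for j < i ≤ j+d, else vs[i].
theorem pv_loop_spec (j : ℕ) (d : ℕ) : ∀ (vs : List Int), j + d < vs.length →
    (((PySem.List.pyRange ((j : ℤ) + (d : ℤ)) j (-1)).foldl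
        (fun vs i => PySem.List.pySetD vs i (PySem.List.pyGetD vs (i - 1) 0)) vs).length = vs.length ∧
     ∀ i : ℕ, ((PySem.List.pyRange ((j : ℤ) + (d : ℤ)) j (-1)).foldl
        (fun vs i => PySem.List.pySetD vs i (PySem.List.pyGetD vs (i - 1) 0)) vs)[i]? =
        if j < i ∧ i ≤ j + d then vs[i - 1]? else vs[i]?) := by
  induction d with
  | zero =>
    intro vs h
    rw [PySem.List.pyRange_neg_one_eq_nil (by omega)]
    refine ⟨rfl, fun i => ?_⟩
    rw [if_neg (by omega)]; rfl
  | succ d ih =>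
    intro vs h
    rw [PySem.List.pyRange_neg_one_cons (by push_cast; omega)]
    have e1 : (j : ℤ) + ((d + 1 : ℕ) : ℤ) = ((j + d + 1 : ℕ) : ℤ) := by push_cast; ring
    have e3 : ((j + d + 1 : ℕ) : ℤ) - 1 = (j : ℤ) + (d : ℤ) := by push_cast; ring
    rw [List.foldl_cons]
    simp only [e1, PySem.List.pySetD_natCast, e3]
    have hc : PySem.List.pyGetD vs ((j : ℤ) + (d : ℤ)) 0 = vs.getD (j + d) 0 := by
      rw [show (j : ℤ) + (d : ℤ) = ((j + d : ℕ) : ℤ) by push_cast; ring, PySem.List.pyGetD_natCast]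
    set c := PySem.List.pyGetD vs ((j : ℤ) + (d : ℤ)) 0 with hcdef
    obtain ⟨hl, hg⟩ := ih (vs.set (j + d + 1) c) (by simp; omega)
    refine ⟨hl.trans (by simp), fun i => ?_⟩
    rw [hg i]
    by_cases h1 : j < i ∧ i ≤ j + d
    · rw [if_pos h1, if_pos (by omega), List.getElem?_set, if_neg (by omega)]
    · rw [if_neg h1, List.getElem?_set]
      by_cases h2 : j + d + 1 = i
      · rw [if_pos h2, if_pos (by omega), if_pos (by omega)]
        subst h2
        rw [show j + d + 1 - 1 = j + d by omega, hc,
          List.getD_eq_getElem _ _ (by omega), List.getElem?_eq_getElem (by omega)]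
      · rw [if_neg h2, if_neg (by omega)]

-- the main case: nonempty first row, in-range index
theorem pv_main (vals : List Int) (rest : List (List Int)) (ind : Int)
    (hind0 : -1 ≤ ind) (hlt : ind + 1 < (vals.length : Int)) :
    switch_oxygen (vals :: rest) ind = switch_oxygen_alt (vals :: rest) ind := by
  have hvne : vals ≠ [] := by intro h; subst h; simp at hlt; omega
  set L := vals.length with hL
  set j := (ind + 1).toNat with hjdef
  have hj : (j : ℤ) = ind + 1 := by omega
  have hjL : j < L := by omega
  set d := L - 1 - j with hd
  have hjd : j + d = L - 1 := by omega
  -- A side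
  have hA : switch_oxygen (vals :: rest) ind =
      (((PySem.List.pyRange ((j : ℤ) + (d : ℤ)) j (-1)).foldl
        (fun vs i => PySem.List.pySetD vs i (PySem.List.pyGetD vs (i - 1) 0)) vals).set j
        (vals.getLast hvne)) :: rest := by
    have h1 : PySem.List.pyGet? (vals :: rest) 0 = some vals := by
      simp [PySem.List.pyGet?, PySem.List.pyIdx?]
    have e1 : (L : ℤ) - 1 = (j : ℤ) + (d : ℤ) := by omega
    simp only [switch_oxygen, h1, ← hL]
    rw [if_pos (by exact_mod_cast by omega)]
    rw [PySem.List.pyGetD_neg_one vals 0 hvne]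
    rw [show ind + 1 = (j : ℤ) from hj.symm, e1]
    rw [PySem.List.pySetD_natCast]
    rw [show (0 : ℤ) = ((0 : ℕ) : ℤ) by norm_num, PySem.List.pySetD_natCast, List.set_cons_zero]
  -- B side: vals.take j ++ last :: (vals.drop j).dropLast
  have hB : switch_oxygen_alt (vals :: rest) ind =
      (vals.take j ++ vals.getLast hvne :: (vals.drop j).dropLast) :: rest := by
    simp only [switch_oxygen_alt, ← hL]
    rw [if_pos (by exact_mod_cast by omega)]
    rw [show ind + 1 = (j : ℤ) from hj.symm]
    rw [PySem.List.slice_from_natCast, PySem.List.slice_to_natCast]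
    set s := vals.drop j with hs
    have hsne : s ≠ [] := by
      simp [hs, List.drop_eq_nil_iff]; omega
    have hgl : s.getLast hsne = vals.getLast hvne := List.getLast_drop hsne
    have h1 : PySem.List.slice s.reverse none (some ((1 : ℕ) : ℤ)) = [vals.getLast hvne] := by
      rw [PySem.List.slice_to_natCast]
      rw [show s.reverse = s.getLast hsne :: s.dropLast.reverse by
        conv_lhs => rw [← List.dropLast_append_getLast hsne]
        simp]
      rw [hgl]; simp
    have h2 : (PySem.List.slice s.reverse (some ((1 : ℕ) : ℤ)) none).reverse = s.dropLast := by
      rw [PySem.List.slice_from_natCast]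
      rw [show s.reverse.drop 1 = s.reverse.tail by simp [List.drop_one]]
      rw [← List.dropLast_reverse, List.reverse_reverse]
    norm_num at h1 h2 ⊢
    rw [h1, h2]
    simp
  rw [hA, hB]
  obtain ⟨hlen, hget⟩ := pv_loop_spec j d vals (by omega)
  congr 1
  apply List.ext_getElem?
  intro i
  rw [List.getElem?_set, hget i]
  have hTlen : (vals.take j).length = j := by simp; omega
  by_cases h1 : j = i
  · subst h1
    rw [if_pos rfl, if_pos (by omega)]
    rw [List.getElem?_append_right (by omega), hTlen, Nat.sub_self]
    simp
  · rw [if_neg h1]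
    by_cases h2 : i < j
    · rw [if_neg (by omega), List.getElem?_append_left (by simpa [hTlen]),
        List.getElem?_take, if_pos (by omega)]
    · -- i > j
      rw [List.getElem?_append_right (by omega), hTlen]
      rw [show i - j = (i - j - 1) + 1 by omega]
      simp only [List.getElem?_cons_succ]
      rw [List.dropLast_eq_take, List.getElem?_take]
      by_cases h3 : i ≤ j + d
      · rw [if_pos (by omega), if_pos (by simp; omega), List.getElem?_drop,
          show j + (i - j - 1) = i - 1 by omega]
      · rw [if_neg (by omega), if_neg (by simp; omega)]
        rw [List.getElem?_eq_none_iff.mpr (by omega)]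

-- ===== VERDICT (by name: the statement is the Claim_ definition above) =====
theorem switch_oxygen_spec : Claim_equal_switch_oxygen := by
  intro vec ind _ hpre
  unfold Spec_switch_oxygen
  obtain ⟨hne, hcase⟩ := hpre
  cases vec with
  | nil => exact absurd rfl hne
  | cons vals rest =>
    simp only [List.headD_cons] at hcase
    rcases hcase with hnil | ⟨hind0, hlt⟩
    · subst hnil
      simp [switch_oxygen, switch_oxygen_alt, PySem.List.pyGet?, PySem.List.pyIdx?,
        PySem.List.pySetD, PySem.List.pySet?]
    · exact pv_main vals rest ind hind0 hlt
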